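-- pv_equiv track=rewrite | github.com/pypi-data/pypi-mirror-276 | packages/congreso/congreso-1.0.4-py3-none-any.whl/congreso/congreso.py | filter_encabezado
-- ===== SOURCE A (Python) =====
-- def filter_encabezado(term: list[dict]):
--   """
--   Filters documents in a list based on the value of the "encabezado" field. Tis is usefull since there are only 2 types of encabezado, BOGC and DS.
--
--   Args:
--       term (list): A list of dictionaries representing documents.
--
--   Returns:
--       tuple: A tuple containing three lists:
--           - BOCG: A list of documents with "encabezado" equal to "BOCG".
--           - DS: A list of documents with "encabezado" equal to "DS".
--           - others: A list of documents with "encabezado" not equal to "BOCG" or "DS".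
--   """
--   BOCG = []
--   DS = []
--   others = []
--   for doc in term:
--     if doc["encabezado"].strip() == "BOCG":
--       BOCG.append(doc)
--     elif doc["encabezado"].strip() == "DS":
--       DS.append(doc)
--     else:
--       others.append(doc)
--   return BOCG, DS, others
-- ===== SOURCE B (Python) =====
-- def filter_encabezado(term: list[dict]):
--   BOCG = [doc for doc in term if doc["encabezado"].strip() == "BOCG"]
--   DS = [doc for doc in term if doc["encabezado"].strip() == "DS"]
--   others = [doc for doc in term if doc["encabezado"].strip() not in ("BOCG", "DS")]
--   return BOCG, DS, others
-- ===== Notes on version B (the rewrite author's own statement) =====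
-- stated objective: simpler
-- what changed: The single loop with three mutable accumulators is replaced by three independent filter comprehensions, one per output list.
import Mathlib
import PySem

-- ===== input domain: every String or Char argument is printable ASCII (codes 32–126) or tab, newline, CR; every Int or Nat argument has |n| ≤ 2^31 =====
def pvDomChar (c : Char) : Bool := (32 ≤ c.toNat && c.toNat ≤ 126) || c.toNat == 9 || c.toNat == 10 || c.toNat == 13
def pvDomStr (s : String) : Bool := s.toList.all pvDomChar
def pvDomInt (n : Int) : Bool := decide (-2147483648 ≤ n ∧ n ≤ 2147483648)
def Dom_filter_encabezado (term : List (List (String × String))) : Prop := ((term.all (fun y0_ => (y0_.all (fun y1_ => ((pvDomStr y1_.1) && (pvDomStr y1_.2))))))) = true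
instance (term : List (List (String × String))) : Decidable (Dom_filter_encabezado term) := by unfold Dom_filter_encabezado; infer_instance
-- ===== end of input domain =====

-- B replaces A's single loop with three mutable accumulators by three independent
-- filter passes (objective: simpler). Equivalence is about the return value.

-- ===== PORT A =====
-- doc["encabezado"]: first-match association-list lookup (none = KeyError, excluded by Pre_)
def pvEnc? (doc : List (String × String)) : Option String :=
  (doc.find? (fun p => p.1 == "encabezado")).map (·.2)

-- the stripped header; on KeyError inputs (outside Pre_) we default to "" (nothing is claimed there)
def pvEnc (doc : List (String × String)) : String :=
  PySem.Str.strip ((pvEnc? doc).getD "")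

def filter_encabezado (term : List (List (String × String))) : (List (List (String × String))) × (List (List (String × String))) × (List (List (String × String))) :=
  let st := term.foldl (fun (st : List (List (String × String)) × List (List (String × String)) × List (List (String × String))) doc =>
    if pvEnc doc == "BOCG" then (st.1 ++ [doc], st.2.1, st.2.2)
    else if pvEnc doc == "DS" then (st.1, st.2.1 ++ [doc], st.2.2)
    else (st.1, st.2.1, st.2.2 ++ [doc])) ([], [], [])
  st

-- ===== PORT B =====
def filter_encabezado_alt (term : List (List (String × String))) : (List (List (String × String))) × (List (List (String × String))) × (List (List (String × String))) :=
  (term.filter (fun doc => pvEnc doc == "BOCG"),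
   term.filter (fun doc => pvEnc doc == "DS"),
   term.filter (fun doc => !(pvEnc doc == "BOCG") && !(pvEnc doc == "DS")))

-- ===== PRECONDITION & SPEC =====
-- Pre_ excludes exactly the inputs where A raises KeyError: a doc without the "encabezado" key.
def Pre_filter_encabezado (term : List (List (String × String))) : Prop :=
  ∀ doc ∈ term, (pvEnc? doc).isSome
instance (term : List (List (String × String))) : Decidable (Pre_filter_encabezado term) := by unfold Pre_filter_encabezado; infer_instance

def pvWitness_filter_encabezado : (List (List (String × String))) :=
  [[("encabezado", " BOCG ")], [("encabezado", "DS")], [("encabezado", "otro")]]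

def Spec_filter_encabezado (term : List (List (String × String))) (out : (List (List (String × String))) × (List (List (String × String))) × (List (List (String × String)))) : Prop := out = filter_encabezado_alt term
instance (term : List (List (String × String))) (out : (List (List (String × String))) × (List (List (String × String))) × (List (List (String × String)))) : Decidable (Spec_filter_encabezado term out) := by unfold Spec_filter_encabezado; infer_instance

-- ===== CLAIM (what is proved, stated in full; the proofs are below) =====
def Claim_equal_filter_encabezado : Prop := ∀ (term : List (List (String × String))), Dom_filter_encabezado term → Pre_filter_encabezado term → Spec_filter_encabezado term (filter_encabezado term)

-- ===== LEMMAS AND PROOFS =====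
lemma filter_loop (term : List (List (String × String)))
    (a b c : List (List (String × String))) :
    term.foldl (fun (st : List (List (String × String)) × List (List (String × String)) × List (List (String × String))) doc =>
      if pvEnc doc == "BOCG" then (st.1 ++ [doc], st.2.1, st.2.2)
      else if pvEnc doc == "DS" then (st.1, st.2.1 ++ [doc], st.2.2)
      else (st.1, st.2.1, st.2.2 ++ [doc])) (a, b, c)
    = (a ++ term.filter (fun doc => pvEnc doc == "BOCG"),
       b ++ term.filter (fun doc => pvEnc doc == "DS"),
       c ++ term.filter (fun doc => !(pvEnc doc == "BOCG") && !(pvEnc doc == "DS"))) := by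
  induction term generalizing a b c with
  | nil => simp
  | cons d t ih =>
    simp only [List.foldl_cons, List.filter_cons]
    by_cases h1 : pvEnc d == "BOCG"
    · rw [if_pos h1, ih]; simp only [beq_iff_eq] at h1; simp [h1]
    · by_cases h2 : pvEnc d == "DS"
      · rw [if_neg h1, if_pos h2, ih]; simp [h1, h2]
      · rw [if_neg h1, if_neg h2, ih]; simp [h1, h2]

-- ===== VERDICT (by name: the statement is the Claim_ definition above) =====
theorem filter_encabezado_spec : Claim_equal_filter_encabezado := by
  intro term _ _
  unfold Spec_filter_encabezado filter_encabezado filter_encabezado_alt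
  simpa using filter_loop term [] [] []
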